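-- pv_equiv track=rewrite | github.com/btltech/astromeric | backend/app/engine/year_ahead.py | _get_eclipse_significance
-- ===== SOURCE A (Python) =====
-- from typing import Dict, List, Optional, Tuple
--
-- def _get_eclipse_significance(eclipse: Dict, impacts: List[Dict]) -> str:
--     """Generate significance description for eclipse impact."""
--     eclipse_type = eclipse.get("type", "Eclipse")
--     impacted = [i["name"] for i in impacts]
--
--     if "Sun" in impacted:
--         return f"{eclipse_type} highlights your core identity and life direction"
--     if "Moon" in impacted:
--         return f"{eclipse_type} stirs emotional changes and home life"
--     if "Ascendant" in impacted:
--         return f"{eclipse_type} marks a significant personal transformation"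
--     if "Midheaven" in impacted:
--         return f"{eclipse_type} triggers career and public life shifts"
--     if "Mercury" in impacted:
--         return f"{eclipse_type} activates communication and thinking patterns"
--     if "Venus" in impacted:
--         return f"{eclipse_type} brings relationship and value shifts"
--     if "Mars" in impacted:
--         return f"{eclipse_type} energizes action and assertion"
--     if "Jupiter" in impacted:
--         return f"{eclipse_type} expands opportunities and beliefs"
--     if "Saturn" in impacted:
--         return f"{eclipse_type} restructures responsibilities and boundaries"
--
--     return f"{eclipse_type} has a subtle influence on your chart"
-- ===== SOURCE B (Python) =====
-- _RANK = {
--     "Sun": 0, "Moon": 1, "Ascendant": 2, "Midheaven": 3, "Mercury": 4,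
--     "Venus": 5, "Mars": 6, "Jupiter": 7, "Saturn": 8,
-- }
--
-- _MSGS = [
--     "highlights your core identity and life direction",
--     "stirs emotional changes and home life",
--     "marks a significant personal transformation",
--     "triggers career and public life shifts",
--     "activates communication and thinking patterns",
--     "brings relationship and value shifts",
--     "energizes action and assertion",
--     "expands opportunities and beliefs",
--     "restructures responsibilities and boundaries",
--     "has a subtle influence on your chart",
-- ]
--
-- def _get_eclipse_significance(eclipse, impacts):
--     # One pass: keep the minimum priority rank seen; 9 is the "no major body" default.
--     best = 9
--     for i in impacts:
--         r = _RANK.get(i["name"], 9)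
--         if r < best:
--             best = r
--     return f"{eclipse.get('type', 'Eclipse')} {_MSGS[best]}"
-- ===== Notes on version B (the rewrite author's own statement) =====
-- stated objective: alternative
-- what changed: Instead of nine sequential membership scans in priority order, B makes a single pass over the impacts computing the minimum priority rank (via a name-to-rank dict) and indexes once into a message table; the priority/short-circuit logic disappears and is replaced by a min-accumulator.
import Mathlib
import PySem

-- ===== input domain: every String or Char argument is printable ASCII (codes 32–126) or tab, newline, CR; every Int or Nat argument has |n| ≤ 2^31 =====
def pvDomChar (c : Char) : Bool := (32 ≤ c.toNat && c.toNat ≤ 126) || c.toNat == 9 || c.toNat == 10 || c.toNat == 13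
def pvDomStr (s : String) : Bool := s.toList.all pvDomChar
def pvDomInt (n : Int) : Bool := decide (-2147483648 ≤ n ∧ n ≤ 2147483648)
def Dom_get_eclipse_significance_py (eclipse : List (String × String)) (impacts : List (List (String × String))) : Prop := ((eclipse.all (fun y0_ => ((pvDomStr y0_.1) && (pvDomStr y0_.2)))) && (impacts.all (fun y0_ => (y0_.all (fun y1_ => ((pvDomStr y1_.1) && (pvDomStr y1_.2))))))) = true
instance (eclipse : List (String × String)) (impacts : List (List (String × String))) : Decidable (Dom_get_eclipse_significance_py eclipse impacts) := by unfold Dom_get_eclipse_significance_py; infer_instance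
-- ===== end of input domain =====

-- B replaces A's nine priority-ordered membership scans with one pass computing the minimum
-- priority rank of the impacted bodies and a single index into a message table (alternative decomposition).


-- dict.get(k, dflt) on an association list: first match, else the default (used by both Pythons for eclipse.get)
def pvGetD (d : List (String × String)) (k dflt : String) : String :=
  match d.find? (fun p => p.1 == k) with
  | some p => p.2
  | none => dflt

-- i["name"]: first match as an Option (none = KeyError, excluded by Pre_)
def pvGetName (i : List (String × String)) : Option String :=
  (i.find? (fun p => p.1 == "name")).map (·.2)

-- ===== PORT A =====
def get_eclipse_significance_py (eclipse : List (String × String)) (impacts : List (List (String × String))) : String :=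
  let eclipse_type := pvGetD eclipse "type" "Eclipse"
  let impacted : List (Option String) := impacts.map pvGetName
  if impacted.contains (some "Sun") then eclipse_type ++ " highlights your core identity and life direction"
  else if impacted.contains (some "Moon") then eclipse_type ++ " stirs emotional changes and home life"
  else if impacted.contains (some "Ascendant") then eclipse_type ++ " marks a significant personal transformation"
  else if impacted.contains (some "Midheaven") then eclipse_type ++ " triggers career and public life shifts"
  else if impacted.contains (some "Mercury") then eclipse_type ++ " activates communication and thinking patterns"
  else if impacted.contains (some "Venus") then eclipse_type ++ " brings relationship and value shifts"
  else if impacted.contains (some "Mars") then eclipse_type ++ " energizes action and assertion"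
  else if impacted.contains (some "Jupiter") then eclipse_type ++ " expands opportunities and beliefs"
  else if impacted.contains (some "Saturn") then eclipse_type ++ " restructures responsibilities and boundaries"
  else eclipse_type ++ " has a subtle influence on your chart"

-- ===== PORT B =====
-- _RANK.get(name, 9): the constant dict lookup, ported exactly as a case analysis on the name
-- (none = missing "name" key, where Python B raises KeyError just like A; excluded by Pre_).
def pvRank (o : Option String) : Nat :=
  match o with
  | none => 9
  | some s =>
    if s = "Sun" then 0 else if s = "Moon" then 1 else if s = "Ascendant" then 2
    else if s = "Midheaven" then 3 else if s = "Mercury" then 4 else if s = "Venus" then 5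
    else if s = "Mars" then 6 else if s = "Jupiter" then 7 else if s = "Saturn" then 8 else 9

def pvMsgs : List String :=
  ["highlights your core identity and life direction",
   "stirs emotional changes and home life",
   "marks a significant personal transformation",
   "triggers career and public life shifts",
   "activates communication and thinking patterns",
   "brings relationship and value shifts",
   "energizes action and assertion",
   "expands opportunities and beliefs",
   "restructures responsibilities and boundaries",
   "has a subtle influence on your chart"]

def get_eclipse_significance_py_alt (eclipse : List (String × String)) (impacts : List (List (String × String))) : String :=
  let best := impacts.foldl (fun b i => min b (pvRank (pvGetName i))) 9
  pvGetD eclipse "type" "Eclipse" ++ " " ++ pvMsgs.getD best ""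

-- ===== PRECONDITION & SPEC =====
-- Pre_: every impact dict carries a "name" key; otherwise Python A (i["name"]) raises KeyError (B does too).
def Pre_get_eclipse_significance_py (eclipse : List (String × String)) (impacts : List (List (String × String))) : Prop :=
  (impacts.all (fun i => i.any (fun p => p.1 == "name"))) = true
instance (eclipse : List (String × String)) (impacts : List (List (String × String))) : Decidable (Pre_get_eclipse_significance_py eclipse impacts) := by unfold Pre_get_eclipse_significance_py; infer_instance

def pvWitness_get_eclipse_significance_py : (List (String × String)) × (List (List (String × String))) :=
  ([("type", "Solar Eclipse")], [[("name", "Moon")], [("name", "Pluto")]])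

def Spec_get_eclipse_significance_py (eclipse : List (String × String)) (impacts : List (List (String × String))) (out : String) : Prop := out = get_eclipse_significance_py_alt eclipse impacts
instance (eclipse : List (String × String)) (impacts : List (List (String × String))) (out : String) : Decidable (Spec_get_eclipse_significance_py eclipse impacts out) := by unfold Spec_get_eclipse_significance_py; infer_instance

-- ===== CLAIM (what is proved, stated in full; the proofs are below) =====
def Claim_equal_get_eclipse_significance_py : Prop := ∀ (eclipse : List (String × String)) (impacts : List (List (String × String))), Dom_get_eclipse_significance_py eclipse impacts → Pre_get_eclipse_significance_py eclipse impacts → Spec_get_eclipse_significance_py eclipse impacts (get_eclipse_significance_py eclipse impacts)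

-- ===== LEMMAS AND PROOFS =====

def pvNames : List String :=
  ["Sun", "Moon", "Ascendant", "Midheaven", "Mercury", "Venus", "Mars", "Jupiter", "Saturn"]

set_option maxHeartbeats 1000000 in
theorem rank_eq_iff (o : Option String) (k : Nat) (hk : k < 9) :
    pvRank o = k ↔ o = some (pvNames.getD k "") := by
  cases o with
  | none => simp only [pvRank]; constructor <;> intro h <;> [omega; simp_all]
  | some s =>
    simp only [pvRank, Option.some.injEq]
    split_ifs with h1 h2 h3 h4 h5 h6 h7 h8 h9 <;> interval_cases k <;> simp_all [pvNames]

theorem foldl_le_init (xs : List (List (String × String))) :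
    ∀ b : Nat, xs.foldl (fun b i => min b (pvRank (pvGetName i))) b ≤ b := by
  induction xs with
  | nil => intro b; simp
  | cons x xs ih =>
    intro b
    exact le_trans (ih _) (Nat.min_le_left _ _)

theorem foldl_le_mem (xs : List (List (String × String))) (i : List (String × String))
    (hi : i ∈ xs) : ∀ b : Nat,
    xs.foldl (fun b i => min b (pvRank (pvGetName i))) b ≤ pvRank (pvGetName i) := by
  induction xs with
  | nil => cases hi
  | cons x xs ih =>
    intro b
    rcases List.mem_cons.mp hi with h | h
    · subst h
      exact le_trans (foldl_le_init xs _) (Nat.min_le_right _ _)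
    · exact ih h _

theorem foldl_cases (xs : List (List (String × String))) :
    ∀ b : Nat, xs.foldl (fun b i => min b (pvRank (pvGetName i))) b = b ∨
      ∃ i ∈ xs, xs.foldl (fun b i => min b (pvRank (pvGetName i))) b = pvRank (pvGetName i) := by
  induction xs with
  | nil => intro b; left; rfl
  | cons x xs ih =>
    intro b
    rcases ih (min b (pvRank (pvGetName x))) with h | ⟨i, hi, h⟩
    · rcases Nat.le_total b (pvRank (pvGetName x)) with hb | hb
      · left; simpa [Nat.min_eq_left hb] using h
      · right
        exact ⟨x, List.mem_cons_self .., by simpa [Nat.min_eq_right hb] using h⟩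
    · right; exact ⟨i, List.mem_cons_of_mem _ hi, h⟩

theorem contains_name_iff (impacts : List (List (String × String))) (n : String) :
    ((impacts.map pvGetName).contains (some n)) = true ↔
      ∃ i ∈ impacts, pvGetName i = some n := by
  simp [List.contains_iff_exists_mem_beq, List.mem_map, eq_comm]

theorem best_eq (impacts : List (List (String × String))) (k : Nat) (hk : k < 9)
    (hmem : ((impacts.map pvGetName).contains (some (pvNames.getD k ""))) = true)
    (hnone : ∀ j, j < k → ((impacts.map pvGetName).contains (some (pvNames.getD j ""))) = false) :
    impacts.foldl (fun b i => min b (pvRank (pvGetName i))) 9 = k := by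
  obtain ⟨i, hi, hname⟩ := (contains_name_iff impacts _).mp hmem
  have hrk : pvRank (pvGetName i) = k := (rank_eq_iff _ _ hk).mpr hname
  have hle := foldl_le_mem impacts i hi 9
  rw [hrk] at hle
  rcases foldl_cases impacts 9 with h | ⟨j, hj, h⟩
  · omega
  · by_contra hne
    have hlt : impacts.foldl (fun b i => min b (pvRank (pvGetName i))) 9 < k :=
      lt_of_le_of_ne hle hne
    have hjn : pvGetName j = some (pvNames.getD (impacts.foldl (fun b i => min b (pvRank (pvGetName i))) 9) "") :=
      (rank_eq_iff _ _ (lt_trans hlt hk)).mp h.symm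
    have hc : ((impacts.map pvGetName).contains
        (some (pvNames.getD (impacts.foldl (fun b i => min b (pvRank (pvGetName i))) 9) ""))) = true :=
      (contains_name_iff impacts _).mpr ⟨j, hj, hjn⟩
    rw [hnone _ hlt] at hc
    exact Bool.false_ne_true hc

theorem best_eq9 (impacts : List (List (String × String)))
    (hnone : ∀ j, j < 9 → ((impacts.map pvGetName).contains (some (pvNames.getD j ""))) = false) :
    impacts.foldl (fun b i => min b (pvRank (pvGetName i))) 9 = 9 := by
  have hle := foldl_le_init impacts 9
  rcases foldl_cases impacts 9 with h | ⟨j, hj, h⟩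
  · exact h
  · by_contra hne
    have hlt : impacts.foldl (fun b i => min b (pvRank (pvGetName i))) 9 < 9 :=
      lt_of_le_of_ne hle hne
    have hjn : pvGetName j = some (pvNames.getD (impacts.foldl (fun b i => min b (pvRank (pvGetName i))) 9) "") :=
      (rank_eq_iff _ _ hlt).mp h.symm
    have hc := (contains_name_iff impacts _).mpr ⟨j, hj, hjn⟩
    rw [hnone _ hlt] at hc
    exact Bool.false_ne_true hc

-- ===== VERDICT (by name: the statement is the Claim_ definition above) =====
theorem get_eclipse_significance_py_spec : Claim_equal_get_eclipse_significance_py := by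
  intro eclipse impacts _ _
  show _ = _
  unfold get_eclipse_significance_py get_eclipse_significance_py_alt
  dsimp only
  split_ifs with h1 h2 h3 h4 h5 h6 h7 h8 h9
  · rw [best_eq impacts 0 (by omega) (by simpa [pvNames] using h1) (by intro j hj; omega)]
    simp [pvMsgs, String.append_assoc]
  · rw [best_eq impacts 1 (by omega) (by simpa [pvNames] using h2)
      (by intro j hj; interval_cases j <;> simp_all [pvNames])]
    simp [pvMsgs, String.append_assoc]
  · rw [best_eq impacts 2 (by omega) (by simpa [pvNames] using h3)
      (by intro j hj; interval_cases j <;> simp_all [pvNames])]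
    simp [pvMsgs, String.append_assoc]
  · rw [best_eq impacts 3 (by omega) (by simpa [pvNames] using h4)
      (by intro j hj; interval_cases j <;> simp_all [pvNames])]
    simp [pvMsgs, String.append_assoc]
  · rw [best_eq impacts 4 (by omega) (by simpa [pvNames] using h5)
      (by intro j hj; interval_cases j <;> simp_all [pvNames])]
    simp [pvMsgs, String.append_assoc]
  · rw [best_eq impacts 5 (by omega) (by simpa [pvNames] using h6)
      (by intro j hj; interval_cases j <;> simp_all [pvNames])]
    simp [pvMsgs, String.append_assoc]
  · rw [best_eq impacts 6 (by omega) (by simpa [pvNames] using h7)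
      (by intro j hj; interval_cases j <;> simp_all [pvNames])]
    simp [pvMsgs, String.append_assoc]
  · rw [best_eq impacts 7 (by omega) (by simpa [pvNames] using h8)
      (by intro j hj; interval_cases j <;> simp_all [pvNames])]
    simp [pvMsgs, String.append_assoc]
  · rw [best_eq impacts 8 (by omega) (by simpa [pvNames] using h9)
      (by intro j hj; interval_cases j <;> simp_all [pvNames])]
    simp [pvMsgs, String.append_assoc]
  · rw [best_eq9 impacts (by intro j hj; interval_cases j <;> simp_all [pvNames])]
    simp [pvMsgs, String.append_assoc]
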